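-- pv_equiv track=rewrite | github.com/Skill-Scanner/SkillScanner | violation-detector/3_get_intent_data_collection.py | get_data_collection_intents
-- ===== SOURCE A (Python) =====
-- def get_data_collection_intents(slot_samples):         ## whether answer in intent sample 1 have 2 not 3 not sure 4 mix
--     intents = {}
--     for result in slot_samples:
--         skill, intent_name, slot, sample = result
--         index = skill + '~' + intent_name
--         if index not in intents:
--             intents[index] = {}
--         if slot['name'] not in intents[index]:
--             intents[index][slot['name']] = []
--         if sample == "":
--             intents[index][slot['name']].append((slot, -1, sample))
--         elif sample == '{' + slot['name'] + '}':
--             intents[index][slot['name']].append((slot, 2, sample))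
--         elif 'my' in sample.lower():                                        # this is too simple
--             intents[index][slot['name']].append((slot, 1, sample))
--         else:
--             intents[index][slot['name']].append((slot, 0, sample))
--     data_collection_intents = {}
--     for i in intents:
--         data_collection_intents[i] = []
--         for slot in intents[i]:
--             values = [j[1] for j in intents[i][slot]]
--             if -1 in values:
--                 data_collection_intents[i].append((intents[i][slot][0][0], -1))
--             elif 1 in values:
--                 data_collection_intents[i].append((intents[i][slot][0][0], 1))
--             elif 0 in values:
--                 data_collection_intents[i].append((intents[i][slot][0][0], 0))
--             else:
--                 data_collection_intents[i].append((intents[i][slot][0][0], 2))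
--     return data_collection_intents
-- ===== SOURCE B (Python) =====
-- def get_data_collection_intents(slot_samples):
--     # Single fused pass: classify each sample straight into a priority rank
--     # (-1 -> 0, 1 -> 1, 0 -> 2, 2 -> 3), keep per (intent index, slot name) only the
--     # first-seen slot object and the minimum rank, then map ranks back to values.
--     BACK = (-1, 1, 0, 2)
--     best = {}
--     for skill, intent_name, slot, sample in slot_samples:
--         index = skill + '~' + intent_name
--         name = slot['name']
--         if sample == "":
--             r = 0
--         elif sample == '{' + name + '}':
--             r = 3
--         elif 'my' in sample.lower():
--             r = 1
--         else:
--             r = 2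
--         slots = best.setdefault(index, {})
--         if name in slots:
--             first, br = slots[name]
--             if r < br:
--                 slots[name] = (first, r)
--         else:
--             slots[name] = (slot, r)
--     return {i: [(first, BACK[r]) for first, r in slots.values()]
--             for i, slots in best.items()}
-- ===== Notes on version B (the rewrite author's own statement) =====
-- stated objective: faster
-- what changed: Instead of grouping every sample into per-(intent,slot) lists and then re-scanning each list four times with membership tests, B classifies each sample into a priority rank in one fused pass and keeps only the first-seen slot object and the running minimum rank per (intent, slot), mapping the rank back to a value at the end.
import Mathlib
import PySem

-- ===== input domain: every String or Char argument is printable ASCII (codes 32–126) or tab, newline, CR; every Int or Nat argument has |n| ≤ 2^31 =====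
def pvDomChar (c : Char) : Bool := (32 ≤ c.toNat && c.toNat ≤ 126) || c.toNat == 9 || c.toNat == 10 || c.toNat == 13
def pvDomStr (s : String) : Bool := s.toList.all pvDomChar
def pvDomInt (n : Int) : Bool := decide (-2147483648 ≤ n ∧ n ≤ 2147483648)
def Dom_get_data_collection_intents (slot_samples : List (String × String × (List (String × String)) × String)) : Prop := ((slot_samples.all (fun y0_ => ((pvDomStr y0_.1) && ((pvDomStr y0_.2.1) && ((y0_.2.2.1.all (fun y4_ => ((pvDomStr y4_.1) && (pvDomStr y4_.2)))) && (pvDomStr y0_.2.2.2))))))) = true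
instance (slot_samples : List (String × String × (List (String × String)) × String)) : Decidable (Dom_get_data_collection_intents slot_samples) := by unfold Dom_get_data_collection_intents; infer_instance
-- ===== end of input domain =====

-- B fuses A's two phases into one pass that keeps, per (intent index, slot name), only the
-- first-seen slot object and the minimum priority rank; equal return value wherever A returns.

-- slot['name'] (dict lookup, first match); Pre_ guarantees the key is present, so the default is never used
def pvSlotName (slot : List (String × String)) : String := (PySem.Dict.mk slot).getD "name" ""

-- ===== PORT A =====
-- the classification if-chain of A's first loop (value appended with each sample)
def aValue (name sample : String) : Int :=
  if sample = "" then -1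
  else if sample = "{" ++ name ++ "}" then 2
  else if PySem.Str.isIn "my" (PySem.Str.lower sample) then 1
  else 0

-- 'if slot['name'] not in intents[index]: intents[index][slot['name']] = []' + append
def aStepInner (inner : PySem.Dict String (List ((List (String × String)) × Int × String)))
    (name : String) (entry : (List (String × String)) × Int × String) :
    PySem.Dict String (List ((List (String × String)) × Int × String)) :=
  let inner := if inner.contains name = false then inner.insert name [] else inner
  inner.insert name (inner.getD name [] ++ [entry])

-- one iteration of A's first loop
def aStep (intents : PySem.Dict String (PySem.Dict String (List ((List (String × String)) × Int × String))))
    (result : String × String × (List (String × String)) × String) :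
    PySem.Dict String (PySem.Dict String (List ((List (String × String)) × Int × String))) :=
  let index := result.1 ++ "~" ++ result.2.1
  let intents := if intents.contains index = false then intents.insert index PySem.Dict.empty else intents
  let name := pvSlotName result.2.2.1
  intents.insert index
    (aStepInner (intents.getD index PySem.Dict.empty) name
      (result.2.2.1, aValue name result.2.2.2, result.2.2.2))

-- the '-1 in values / 1 in values / 0 in values / else' chain of A's second loop
def aSelect (values : List Int) : Int :=
  if values.contains (-1) then -1
  else if values.contains 1 then 1
  else if values.contains 0 then 0
  else 2

def get_data_collection_intents (slot_samples : List (String × String × (List (String × String)) × String)) : List (String × List ((List (String × String)) × Int)) :=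
  let intents := slot_samples.foldl aStep PySem.Dict.empty
  intents.items.map (fun q =>
    (q.1, q.2.items.map (fun p =>
      ((p.2.headD ([], 0, "")).1, aSelect (p.2.map (fun j => j.2.1))))))

-- ===== PORT B =====
-- B's fused classification: straight to the priority rank
def bRank (name sample : String) : Int :=
  if sample = "" then 0
  else if sample = "{" ++ name ++ "}" then 3
  else if PySem.Str.isIn "my" (PySem.Str.lower sample) then 1
  else 2

-- BACK[r]; r is always one of 0,1,2,3, so the default is never used (Python would raise)
def bBack (r : Int) : Int := PySem.List.pyGetD [(-1 : Int), 1, 0, 2] r 2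

-- record the slot object on first sight, keep the minimum rank thereafter
def bStepInner (slots : PySem.Dict String ((List (String × String)) × Int))
    (slot : List (String × String)) (name : String) (r : Int) :
    PySem.Dict String ((List (String × String)) × Int) :=
  match slots.get? name with
  | some (first, br) => if r < br then slots.insert name (first, r) else slots
  | none => slots.insert name (slot, r)

def bStep (best : PySem.Dict String (PySem.Dict String ((List (String × String)) × Int)))
    (result : String × String × (List (String × String)) × String) :
    PySem.Dict String (PySem.Dict String ((List (String × String)) × Int)) :=
  let index := result.1 ++ "~" ++ result.2.1
  let slot := result.2.2.1
  let name := pvSlotName slot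
  best.insert index (bStepInner (best.getD index PySem.Dict.empty) slot name (bRank name result.2.2.2))

def get_data_collection_intents_alt (slot_samples : List (String × String × (List (String × String)) × String)) : List (String × List ((List (String × String)) × Int)) :=
  let best := slot_samples.foldl bStep PySem.Dict.empty
  best.items.map (fun q => (q.1, q.2.items.map (fun p => (p.2.1, bBack p.2.2))))

-- ===== PRECONDITION & SPEC =====
-- Pre_ excludes exactly the inputs where slot['name'] raises KeyError in A (and in B alike)
def Pre_get_data_collection_intents (slot_samples : List (String × String × (List (String × String)) × String)) : Prop :=
  slot_samples.all (fun s => (PySem.Dict.mk s.2.2.1).contains "name") = true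
instance (slot_samples : List (String × String × (List (String × String)) × String)) : Decidable (Pre_get_data_collection_intents slot_samples) := by unfold Pre_get_data_collection_intents; infer_instance

def pvWitness_get_data_collection_intents : (List (String × String × (List (String × String)) × String)) :=
  [("skill", "intent", [("name", "city")], "my city"), ("skill", "intent", [("name", "city")], "")]

def Spec_get_data_collection_intents (slot_samples : List (String × String × (List (String × String)) × String)) (out : List (String × List ((List (String × String)) × Int))) : Prop := out = get_data_collection_intents_alt slot_samples
instance (slot_samples : List (String × String × (List (String × String)) × String)) (out : List (String × List ((List (String × String)) × Int))) : Decidable (Spec_get_data_collection_intents slot_samples out) := by unfold Spec_get_data_collection_intents; infer_instance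

-- ===== CLAIM (what is proved, stated in full; the proofs are below) =====
def Claim_equal_get_data_collection_intents : Prop := ∀ (slot_samples : List (String × String × (List (String × String)) × String)), Dom_get_data_collection_intents slot_samples → Pre_get_data_collection_intents slot_samples → Spec_get_data_collection_intents slot_samples (get_data_collection_intents slot_samples)

-- ===== LEMMAS AND PROOFS =====

-- the rank A's per-slot value corresponds to
def pvRank (v : Int) : Int :=
  if v = -1 then 0 else if v = 1 then 1 else if v = 0 then 2 else 3

-- minimum rank over an A-side entry list, starting from 4 (above every rank)
def mrank (l : List ((List (String × String)) × Int × String)) : Int :=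
  l.foldl (fun m e => min m (pvRank e.2.1)) 4

lemma pvRank_bounds (v : Int) : 0 ≤ pvRank v ∧ pvRank v ≤ 3 := by
  unfold pvRank; split_ifs <;> omega

lemma bRank_eq (name sample : String) : bRank name sample = pvRank (aValue name sample) := by
  unfold bRank aValue; split_ifs <;> decide

-- invariant between A's per-intent inner dict and B's
def InvInner (a : PySem.Dict String (List ((List (String × String)) × Int × String)))
    (b : PySem.Dict String ((List (String × String)) × Int)) : Prop :=
  a.keys = b.keys ∧ a.keys.Nodup ∧
  ∀ sn l, a.get? sn = some l → l ≠ [] ∧ b.get? sn = some ((l.headD ([], 0, "")).1, mrank l)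

def InvD (dA : PySem.Dict String (PySem.Dict String (List ((List (String × String)) × Int × String))))
    (dB : PySem.Dict String (PySem.Dict String ((List (String × String)) × Int))) : Prop :=
  dA.keys = dB.keys ∧ dA.keys.Nodup ∧
  ∀ k, k ∈ dA.keys → InvInner (dA.getD k PySem.Dict.empty) (dB.getD k PySem.Dict.empty)

lemma invInner_empty : InvInner PySem.Dict.empty PySem.Dict.empty := by
  refine ⟨rfl, List.nodup_nil, ?_⟩
  intro sn l h
  simp [PySem.Dict.get?_empty] at h

lemma inv_empty : InvD PySem.Dict.empty PySem.Dict.empty := by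
  refine ⟨rfl, List.nodup_nil, ?_⟩
  intro k hk
  simp [PySem.Dict.keys_empty] at hk


-- ---- foldl-min facts (the accumulator only ever decreases, to a rank attained in the list) ----

lemma mr_foldl_le_acc (l : List ((List (String × String)) × Int × String)) :
    ∀ a : Int, l.foldl (fun m e => min m (pvRank e.2.1)) a ≤ a := by
  induction l with
  | nil => intro a; simp [List.foldl]
  | cons e t ih =>
    intro a
    calc t.foldl (fun m e => min m (pvRank e.2.1)) (min a (pvRank e.2.1)) ≤ min a (pvRank e.2.1) := ih _
    _ ≤ a := min_le_left _ _

lemma mr_foldl_le_mem (l : List ((List (String × String)) × Int × String)) :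
    ∀ (a : Int) (e : (List (String × String)) × Int × String), e ∈ l →
      l.foldl (fun m e => min m (pvRank e.2.1)) a ≤ pvRank e.2.1 := by
  induction l with
  | nil => intro a e h; simp at h
  | cons x t ih =>
    intro a e h
    rcases List.mem_cons.mp h with h | h
    · subst h
      calc t.foldl (fun m e => min m (pvRank e.2.1)) (min a (pvRank e.2.1)) ≤ min a (pvRank e.2.1) :=
        mr_foldl_le_acc t _
      _ ≤ pvRank e.2.1 := min_le_right _ _
    · exact ih _ e h

lemma mr_foldl_lb (l : List ((List (String × String)) × Int × String)) :
    ∀ (a c : Int), (∀ e ∈ l, c ≤ pvRank e.2.1) → c ≤ a →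
      c ≤ l.foldl (fun m e => min m (pvRank e.2.1)) a := by
  induction l with
  | nil => intro a c _ h; simpa [List.foldl] using h
  | cons x t ih =>
    intro a c hall ha
    exact ih _ c (fun e he => hall e (List.mem_cons_of_mem _ he))
      (le_min ha (hall x (List.mem_cons_self)))

lemma mrank_le_mem (l : List ((List (String × String)) × Int × String))
    (e : (List (String × String)) × Int × String) (h : e ∈ l) : mrank l ≤ pvRank e.2.1 :=
  mr_foldl_le_mem l 4 e h

lemma mrank_lb (l : List ((List (String × String)) × Int × String)) (c : Int)
    (hall : ∀ e ∈ l, c ≤ pvRank e.2.1) (hc : c ≤ 4) : c ≤ mrank l :=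
  mr_foldl_lb l 4 c hall hc

lemma mrank_singleton (e : (List (String × String)) × Int × String) : mrank [e] = pvRank e.2.1 := by
  have := pvRank_bounds e.2.1
  simp [mrank, List.foldl]
  omega

lemma mrank_append (l : List ((List (String × String)) × Int × String))
    (e : (List (String × String)) × Int × String) :
    mrank (l ++ [e]) = min (mrank l) (pvRank e.2.1) := by
  simp [mrank, List.foldl_append, List.foldl]

lemma pvRank_eq_zero {v : Int} : pvRank v = 0 ↔ v = -1 := by unfold pvRank; split_ifs <;> omega
lemma pvRank_eq_one {v : Int} : pvRank v = 1 ↔ v = 1 := by unfold pvRank; split_ifs <;> omega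
lemma pvRank_eq_two {v : Int} : pvRank v = 2 ↔ v = 0 := by unfold pvRank; split_ifs <;> omega

-- A's four-way membership chain over a group equals B's rank-minimum mapped back
lemma select_eq (l : List ((List (String × String)) × Int × String)) (h : l ≠ []) :
    aSelect (l.map (fun j => j.2.1)) = bBack (mrank l) := by
  obtain ⟨e0, t0, rfl⟩ := List.exists_cons_of_ne_nil h
  set l := e0 :: t0 with hl
  have hmem : ∀ v : Int, (l.map (fun j => j.2.1)).contains v = true ↔ ∃ e ∈ l, e.2.1 = v := by
    intro v
    simp [List.mem_map]
  have hub : mrank l ≤ 3 := le_trans (mrank_le_mem l e0 (by simp [hl])) (pvRank_bounds _).2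
  unfold aSelect
  by_cases h1 : ∃ e ∈ l, e.2.1 = -1
  · obtain ⟨e, he, hv⟩ := h1
    have h0 : mrank l ≤ 0 := by
      have := mrank_le_mem l e he
      rw [hv] at this; simpa [pvRank] using this
    have h0' : 0 ≤ mrank l := mrank_lb l 0 (fun e _ => (pvRank_bounds e.2.1).1) (by omega)
    have : mrank l = 0 := le_antisymm h0 h0'
    rw [this]
    rw [if_pos ((hmem (-1)).mpr ⟨e, he, hv⟩)]
    decide
  · rw [if_neg (by simp only [hmem]; exact h1)]
    have hlb1 : 1 ≤ mrank l := mrank_lb l 1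
      (fun e he => by
        have h0 := (pvRank_bounds e.2.1).1
        have : pvRank e.2.1 ≠ 0 := fun hz => h1 ⟨e, he, pvRank_eq_zero.mp hz⟩
        omega) (by omega)
    by_cases h2 : ∃ e ∈ l, e.2.1 = 1
    · obtain ⟨e, he, hv⟩ := h2
      have hle : mrank l ≤ 1 := by
        have := mrank_le_mem l e he
        rw [hv] at this; simpa [pvRank] using this
      have : mrank l = 1 := le_antisymm hle hlb1
      rw [this, if_pos ((hmem 1).mpr ⟨e, he, hv⟩)]
      decide
    · rw [if_neg (by simp only [hmem]; exact h2)]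
      have hlb2 : 2 ≤ mrank l := mrank_lb l 2
        (fun e he => by
          have h0 := (pvRank_bounds e.2.1).1
          have hz : pvRank e.2.1 ≠ 0 := fun hz => h1 ⟨e, he, pvRank_eq_zero.mp hz⟩
          have ho : pvRank e.2.1 ≠ 1 := fun ho => h2 ⟨e, he, pvRank_eq_one.mp ho⟩
          omega) (by omega)
      by_cases h3 : ∃ e ∈ l, e.2.1 = 0
      · obtain ⟨e, he, hv⟩ := h3
        have hle : mrank l ≤ 2 := by
          have := mrank_le_mem l e he
          rw [hv] at this; simpa [pvRank] using this
        have : mrank l = 2 := le_antisymm hle hlb2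
        rw [this, if_pos ((hmem 0).mpr ⟨e, he, hv⟩)]
        decide
      · rw [if_neg (by simp only [hmem]; exact h3)]
        have hlb3 : 3 ≤ mrank l := mrank_lb l 3
          (fun e he => by
            have h0 := (pvRank_bounds e.2.1).1
            have hz : pvRank e.2.1 ≠ 0 := fun hz => h1 ⟨e, he, pvRank_eq_zero.mp hz⟩
            have ho : pvRank e.2.1 ≠ 1 := fun ho => h2 ⟨e, he, pvRank_eq_one.mp ho⟩
            have ht : pvRank e.2.1 ≠ 2 := fun ht => h3 ⟨e, he, pvRank_eq_two.mp ht⟩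
            omega) (by omega)
        have : mrank l = 3 := le_antisymm hub hlb3
        rw [this]
        decide

-- ---- the two step functions in closed form ----

lemma aStepInner_eq (a : PySem.Dict String (List ((List (String × String)) × Int × String)))
    (name : String) (e : (List (String × String)) × Int × String) :
    aStepInner a name e = a.insert name (a.getD name [] ++ [e]) := by
  unfold aStepInner
  by_cases hc : a.contains name = false
  · simp only [hc, if_true]
    rw [PySem.Dict.getD_insert_self, PySem.Dict.insert_insert_self,
        PySem.Dict.getD_of_not_contains a [] hc]
  · have hc' : a.contains name = true := by simpa using hc
    simp [hc']

lemma aStep_eq (d : PySem.Dict String (PySem.Dict String (List ((List (String × String)) × Int × String))))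
    (res : String × String × (List (String × String)) × String) :
    aStep d res = d.insert (res.1 ++ "~" ++ res.2.1)
      (aStepInner (d.getD (res.1 ++ "~" ++ res.2.1) PySem.Dict.empty) (pvSlotName res.2.2.1)
        (res.2.2.1, aValue (pvSlotName res.2.2.1) res.2.2.2, res.2.2.2)) := by
  unfold aStep
  by_cases hc : d.contains (res.1 ++ "~" ++ res.2.1) = false
  · simp only [hc, if_true]
    rw [PySem.Dict.getD_insert_self, PySem.Dict.insert_insert_self,
        PySem.Dict.getD_of_not_contains d PySem.Dict.empty hc]
  · have hc' : d.contains (res.1 ++ "~" ++ res.2.1) = true := by simpa using hc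
    simp [hc']

lemma headD_append (l : List ((List (String × String)) × Int × String))
    (e d : (List (String × String)) × Int × String) (h : l ≠ []) :
    (l ++ [e]).headD d = l.headD d := by
  cases l with
  | nil => exact absurd rfl h
  | cons x t => rfl

lemma invInner_step (a : PySem.Dict String (List ((List (String × String)) × Int × String)))
    (b : PySem.Dict String ((List (String × String)) × Int))
    (h : InvInner a b) (name : String) (slot : List (String × String)) (v : Int) (sample : String) :
    InvInner (aStepInner a name (slot, v, sample)) (bStepInner b slot name (pvRank v)) := by
  obtain ⟨hk, hnd, hv⟩ := h
  rw [aStepInner_eq]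
  cases hga : a.get? name with
  | none =>
    have hgb : b.get? name = none := by
      rw [PySem.Dict.get?_eq_none_iff_not_mem_keys] at hga ⊢
      rw [← hk]; exact hga
    have hca : a.contains name = false := by
      rw [PySem.Dict.contains_eq_isSome_get?, hga]; rfl
    have hcb : b.contains name = false := by
      rw [PySem.Dict.contains_eq_isSome_get?, hgb]; rfl
    rw [PySem.Dict.getD_of_get?_eq_none _ _ hga]
    unfold bStepInner
    rw [hgb]
    dsimp only
    refine ⟨?_, ?_, ?_⟩
    · rw [PySem.Dict.keys_insert_of_not_contains _ _ hca,
          PySem.Dict.keys_insert_of_not_contains _ _ hcb, hk]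
    · exact PySem.Dict.nodup_keys_insert _ _ _ hnd
    · intro sn l hsn
      rw [PySem.Dict.get?_insert] at hsn
      by_cases he : sn = name
      · rw [if_pos he] at hsn
        cases hsn
        refine ⟨by simp, ?_⟩
        rw [PySem.Dict.get?_insert, if_pos he]
        simp [mrank_singleton]
      · rw [if_neg he] at hsn
        obtain ⟨hne, hb⟩ := hv sn l hsn
        exact ⟨hne, by rw [PySem.Dict.get?_insert, if_neg he]; exact hb⟩
  | some l0 =>
    obtain ⟨hne0, hgb⟩ := hv name l0 hga
    have hca : a.contains name = true := by
      rw [PySem.Dict.contains_eq_isSome_get?, hga]; rfl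
    have hcb : b.contains name = true := by
      rw [PySem.Dict.contains_eq_isSome_get?, hgb]; rfl
    rw [PySem.Dict.getD_of_get?_eq_some _ _ hga]
    unfold bStepInner
    rw [hgb]
    dsimp only
    by_cases hlt : pvRank v < mrank l0
    · rw [if_pos hlt]
      refine ⟨?_, ?_, ?_⟩
      · rw [PySem.Dict.keys_insert_of_contains _ _ hca,
            PySem.Dict.keys_insert_of_contains _ _ hcb, hk]
      · exact PySem.Dict.nodup_keys_insert _ _ _ hnd
      · intro sn l hsn
        rw [PySem.Dict.get?_insert] at hsn
        by_cases he : sn = name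
        · rw [if_pos he] at hsn
          cases hsn
          refine ⟨by simp, ?_⟩
          rw [PySem.Dict.get?_insert, if_pos he]
          rw [headD_append _ _ _ hne0, mrank_append]
          have : min (mrank l0) (pvRank v) = pvRank v := by omega
          rw [this]
        · rw [if_neg he] at hsn
          obtain ⟨hne, hb⟩ := hv sn l hsn
          exact ⟨hne, by rw [PySem.Dict.get?_insert, if_neg he]; exact hb⟩
    · rw [if_neg hlt]
      refine ⟨?_, ?_, ?_⟩
      · rw [PySem.Dict.keys_insert_of_contains _ _ hca, hk]
      · exact PySem.Dict.nodup_keys_insert _ _ _ hnd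
      · intro sn l hsn
        rw [PySem.Dict.get?_insert] at hsn
        by_cases he : sn = name
        · rw [if_pos he] at hsn
          cases hsn
          refine ⟨by simp, ?_⟩
          rw [he, hgb, headD_append _ _ _ hne0, mrank_append]
          have : min (mrank l0) (pvRank v) = mrank l0 := by omega
          rw [this]
        · rw [if_neg he] at hsn
          exact hv sn l hsn

lemma inv_step (dA : PySem.Dict String (PySem.Dict String (List ((List (String × String)) × Int × String))))
    (dB : PySem.Dict String (PySem.Dict String ((List (String × String)) × Int)))
    (h : InvD dA dB) (res : String × String × (List (String × String)) × String) :
    InvD (aStep dA res) (bStep dB res) := by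
  obtain ⟨hk, hnd, hv⟩ := h
  rw [aStep_eq]
  simp only [bStep]
  rw [bRank_eq]
  have hinner : InvInner (dA.getD (res.1 ++ "~" ++ res.2.1) PySem.Dict.empty)
      (dB.getD (res.1 ++ "~" ++ res.2.1) PySem.Dict.empty) := by
    by_cases hm : (res.1 ++ "~" ++ res.2.1) ∈ dA.keys
    · exact hv _ hm
    · have hma : dA.get? (res.1 ++ "~" ++ res.2.1) = none :=
        (PySem.Dict.get?_eq_none_iff_not_mem_keys _ _).mpr hm
      have hmb : dB.get? (res.1 ++ "~" ++ res.2.1) = none :=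
        (PySem.Dict.get?_eq_none_iff_not_mem_keys _ _).mpr (hk ▸ hm)
      rw [PySem.Dict.getD_of_get?_eq_none _ _ hma, PySem.Dict.getD_of_get?_eq_none _ _ hmb]
      exact invInner_empty
  have hstep := invInner_step _ _ hinner (pvSlotName res.2.2.1) res.2.2.1
    (aValue (pvSlotName res.2.2.1) res.2.2.2) res.2.2.2
  refine ⟨?_, ?_, ?_⟩
  · by_cases hc : dA.contains (res.1 ++ "~" ++ res.2.1) = true
    · have hcb : dB.contains (res.1 ++ "~" ++ res.2.1) = true := by
        rw [PySem.Dict.contains_iff_mem_keys] at hc ⊢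
        rw [← hk]; exact hc
      rw [PySem.Dict.keys_insert_of_contains _ _ hc,
          PySem.Dict.keys_insert_of_contains _ _ hcb, hk]
    · have hc' : dA.contains (res.1 ++ "~" ++ res.2.1) = false := by
        cases hx : dA.contains (res.1 ++ "~" ++ res.2.1)
        · rfl
        · exact absurd hx hc
      have hcb : dB.contains (res.1 ++ "~" ++ res.2.1) = false := by
        cases hx : dB.contains (res.1 ++ "~" ++ res.2.1)
        · rfl
        · exact absurd (by rw [PySem.Dict.contains_iff_mem_keys] at hx ⊢; rw [hk]; exact hx) hc
      rw [PySem.Dict.keys_insert_of_not_contains _ _ hc',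
          PySem.Dict.keys_insert_of_not_contains _ _ hcb, hk]
  · exact PySem.Dict.nodup_keys_insert _ _ _ hnd
  · intro k hkmem
    by_cases he : k = res.1 ++ "~" ++ res.2.1
    · subst he
      rw [PySem.Dict.getD_insert_self, PySem.Dict.getD_insert_self]
      exact hstep
    · rw [PySem.Dict.getD_insert_of_ne _ _ _ he, PySem.Dict.getD_insert_of_ne _ _ _ he]
      have : k ∈ dA.keys := by
        rcases (PySem.Dict.mem_keys_insert _ _ _ _).mp hkmem with h | h
        · exact absurd h he
        · exact h
      exact hv k this

lemma inv_foldl (l : List (String × String × (List (String × String)) × String)) :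
    ∀ dA dB, InvD dA dB → InvD (l.foldl aStep dA) (l.foldl bStep dB) := by
  induction l with
  | nil => intro dA dB h; exact h
  | cons x t ih => intro dA dB h; exact ih _ _ (inv_step _ _ h x)

-- ---- rendering: equal dict states produce equal output lists ----

lemma renderInner_eq (a : PySem.Dict String (List ((List (String × String)) × Int × String)))
    (b : PySem.Dict String ((List (String × String)) × Int)) (h : InvInner a b) :
    a.items.map (fun p => ((p.2.headD ([], 0, "")).1, aSelect (p.2.map (fun j => j.2.1))))
      = b.items.map (fun p => (p.2.1, bBack p.2.2)) := by
  obtain ⟨hk, hnd, hv⟩ := h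
  have hndb : b.keys.Nodup := hk ▸ hnd
  rw [PySem.Dict.items_eq_map_keys a hnd ([]), PySem.Dict.items_eq_map_keys b hndb (([], 0))]
  rw [hk, List.map_map, List.map_map]
  apply List.map_congr_left
  intro sn hsn
  have hsn' : sn ∈ a.keys := hk ▸ hsn
  obtain ⟨l, hga⟩ : ∃ l, a.get? sn = some l := by
    cases hx : a.get? sn with
    | none => exact absurd hsn' ((PySem.Dict.get?_eq_none_iff_not_mem_keys _ _).mp hx)
    | some l => exact ⟨l, rfl⟩
  obtain ⟨hne, hgb⟩ := hv sn l hga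
  simp only [Function.comp]
  rw [PySem.Dict.getD_of_get?_eq_some _ _ hga, PySem.Dict.getD_of_get?_eq_some _ _ hgb]
  exact congrArg (Prod.mk _) (select_eq l hne)

lemma render_eq (dA : PySem.Dict String (PySem.Dict String (List ((List (String × String)) × Int × String))))
    (dB : PySem.Dict String (PySem.Dict String ((List (String × String)) × Int)))
    (h : InvD dA dB) :
    dA.items.map (fun q => (q.1, q.2.items.map (fun p =>
        ((p.2.headD ([], 0, "")).1, aSelect (p.2.map (fun j => j.2.1))))))
      = dB.items.map (fun q => (q.1, q.2.items.map (fun p => (p.2.1, bBack p.2.2)))) := by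
  obtain ⟨hk, hnd, hv⟩ := h
  have hndb : dB.keys.Nodup := hk ▸ hnd
  rw [PySem.Dict.items_eq_map_keys dA hnd PySem.Dict.empty,
      PySem.Dict.items_eq_map_keys dB hndb PySem.Dict.empty]
  rw [hk, List.map_map, List.map_map]
  apply List.map_congr_left
  intro k hkm
  have hkm' : k ∈ dA.keys := hk ▸ hkm
  simp only [Function.comp]
  exact congrArg (Prod.mk k) (renderInner_eq _ _ (hv k hkm'))

-- ===== VERDICT (by name: the statement is the Claim_ definition above) =====
theorem get_data_collection_intents_spec : Claim_equal_get_data_collection_intents := by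
  intro slot_samples _ _
  unfold Spec_get_data_collection_intents
  simp only [get_data_collection_intents, get_data_collection_intents_alt]
  exact render_eq _ _ (inv_foldl slot_samples _ _ inv_empty)
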